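-- pv_equiv track=rewrite | github.com/Lost-MSth/Lost | PH/US-TC 2025/立体集合.py | get_set_binary
-- ===== SOURCE A (Python) =====
-- def get_set_binary(a, b, c):
--     res = 0
--     for i in range(5):
--         va = (a // (10 ** i)) % 10
--         vb = (b // (10 ** i)) % 10
--         vc = (c // (10 ** i)) % 10
--
--         if va == vb == vc:
--             res += 1 * (2 ** i)
--         elif va != vb and vb != vc and va != vc:
--             continue
--         else:
--             raise ValueError("Not a set")
--     return res
-- ===== SOURCE B (Python) =====
-- def get_set_binary(a, b, c):
--     # Recursive Horner-style scheme: peel one digit column per level with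
--     # //10 and %10 (no powers, no loop), build the bitmask back-to-front
--     # as bit + 2 * rest.
--     def go(x, y, z, k):
--         if k == 0:
--             return 0
--         dx = x % 10
--         dy = y % 10
--         dz = z % 10
--         rest = go(x // 10, y // 10, z // 10, k - 1)
--         if dx == dy == dz:
--             return 1 + 2 * rest
--         if dx != dy and dy != dz and dx != dz:
--             return 2 * rest
--         raise ValueError("Not a set")
--     return go(a, b, c, 5)
-- ===== Notes on version B (the rewrite author's own statement) =====
-- stated objective: alternative
-- what changed: B replaces A's indexed loop over 10**i powers by a recursive Horner-style scheme that peels one digit column per level with //10 and %10 and assembles the bitmask back-to-front as bit + 2*rest.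
import Mathlib
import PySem

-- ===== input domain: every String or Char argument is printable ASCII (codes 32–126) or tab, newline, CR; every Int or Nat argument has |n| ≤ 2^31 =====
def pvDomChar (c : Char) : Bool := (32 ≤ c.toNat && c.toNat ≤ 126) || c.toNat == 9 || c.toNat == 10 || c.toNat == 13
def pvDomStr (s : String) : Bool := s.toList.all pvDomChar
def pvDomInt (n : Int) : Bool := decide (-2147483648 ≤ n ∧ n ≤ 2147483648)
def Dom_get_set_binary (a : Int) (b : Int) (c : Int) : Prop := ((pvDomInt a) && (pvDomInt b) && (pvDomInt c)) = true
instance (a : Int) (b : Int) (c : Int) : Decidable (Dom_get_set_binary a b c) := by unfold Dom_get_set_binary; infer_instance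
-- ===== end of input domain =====

-- B replaces A's indexed power-based loop by a recursive Horner-style peel (//10, %10 per level, bitmask built as bit + 2*rest) ('alternative'); equal wherever A returns (Pre_ excludes A's ValueError).


-- digit extraction (x // 10**i) % 10, the arithmetic A performs
def pvDigit (x : Int) (i : Nat) : Int := PySem.Int.mod (PySem.Int.floordiv x (10 ^ i)) 10

-- ===== PORT A =====
-- loop body of A's single fused loop; none = the 'raise ValueError' path
def pvStepA (a : Int) (b : Int) (c : Int) (acc : Option Int) (i : Nat) : Option Int :=
  match acc with
  | none => none
  | some res =>
    let va := pvDigit a i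
    let vb := pvDigit b i
    let vc := pvDigit c i
    if va = vb ∧ vb = vc then some (res + 1 * 2 ^ i)
    else if va ≠ vb ∧ vb ≠ vc ∧ va ≠ vc then some res
    else none

def get_set_binary (a : Int) (b : Int) (c : Int) : Int :=
  ((List.range 5).foldl (pvStepA a b c) (some 0)).getD 0   -- Pre_ excludes the raising (none) path

-- ===== PORT B =====
-- Source B's inner 'go': peel the last digit of each number, recurse on x//10, combine as bit + 2*rest; none = the 'raise ValueError' path
def pvGoB (x : Int) (y : Int) (z : Int) : Nat → Option Int
  | 0 => some 0
  | k + 1 =>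
    let dx := PySem.Int.mod x 10
    let dy := PySem.Int.mod y 10
    let dz := PySem.Int.mod z 10
    match pvGoB (PySem.Int.floordiv x 10) (PySem.Int.floordiv y 10) (PySem.Int.floordiv z 10) k with
    | none => none
    | some rest =>
      if dx = dy ∧ dy = dz then some (1 + 2 * rest)
      else if dx ≠ dy ∧ dy ≠ dz ∧ dx ≠ dz then some (2 * rest)
      else none

def get_set_binary_alt (a : Int) (b : Int) (c : Int) : Int :=
  (pvGoB a b c 5).getD 0   -- Pre_ excludes the raising (none) path

-- ===== PRECONDITION & SPEC =====
-- Pre_ excludes exactly the inputs where some digit column is neither all-equal nor all-pairwise-distinct, on which A raises ValueError("Not a set").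
def Pre_get_set_binary (a : Int) (b : Int) (c : Int) : Prop :=
  ∀ i < 5, (pvDigit a i = pvDigit b i ∧ pvDigit b i = pvDigit c i) ∨
           (pvDigit a i ≠ pvDigit b i ∧ pvDigit b i ≠ pvDigit c i ∧ pvDigit a i ≠ pvDigit c i)
instance (a : Int) (b : Int) (c : Int) : Decidable (Pre_get_set_binary a b c) := by
  unfold Pre_get_set_binary; infer_instance

def pvWitness_get_set_binary : Int × Int × Int := (123, 456, 789)

def Spec_get_set_binary (a : Int) (b : Int) (c : Int) (out : Int) : Prop := out = get_set_binary_alt a b c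
instance (a : Int) (b : Int) (c : Int) (out : Int) : Decidable (Spec_get_set_binary a b c out) := by unfold Spec_get_set_binary; infer_instance

-- ===== CLAIM (what is proved, stated in full; the proofs are below) =====
def Claim_equal_get_set_binary : Prop := ∀ (a : Int) (b : Int) (c : Int), Dom_get_set_binary a b c → Pre_get_set_binary a b c → Spec_get_set_binary a b c (get_set_binary a b c)

-- ===== LEMMAS AND PROOFS =====

-- shifting one digit off the number shifts the column index
theorem pvDigit_floordiv (x : Int) (i : Nat) :
    pvDigit (PySem.Int.floordiv x 10) i = pvDigit x (i + 1) := by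
  unfold pvDigit
  congr 1
  rw [PySem.Int.floordiv_eq_ediv_of_pos (by norm_num : (0:Int) < 10),
      PySem.Int.floordiv_eq_ediv_of_pos (by positivity : (0:Int) < 10 ^ i),
      PySem.Int.floordiv_eq_ediv_of_pos (by positivity : (0:Int) < 10 ^ (i + 1)),
      Int.ediv_ediv_of_nonneg (by norm_num), pow_succ]
  ring_nf

-- the last digit is column 0
theorem pvMod_eq_digit_zero (x : Int) : PySem.Int.mod x 10 = pvDigit x 0 := by
  unfold pvDigit
  rw [pow_zero, PySem.Int.floordiv_eq_ediv_of_pos (by norm_num : (0:Int) < 1), Int.ediv_one]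

-- closed evaluation of B's recursion when every column up to the fuel is valid
theorem pvGoB_eval (k : Nat) : ∀ (x y z : Int),
    (∀ i < k, (pvDigit x i = pvDigit y i ∧ pvDigit y i = pvDigit z i) ∨
              (pvDigit x i ≠ pvDigit y i ∧ pvDigit y i ≠ pvDigit z i ∧ pvDigit x i ≠ pvDigit z i)) →
    pvGoB x y z k = some (((List.range k).map
      (fun i => if pvDigit x i = pvDigit y i ∧ pvDigit y i = pvDigit z i then (2:Int) ^ i else 0)).sum) := by
  induction k with
  | zero => intro x y z _; simp [pvGoB]
  | succ k ih =>
    intro x y z h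
    have h' : ∀ i < k, (pvDigit (PySem.Int.floordiv x 10) i = pvDigit (PySem.Int.floordiv y 10) i ∧
                pvDigit (PySem.Int.floordiv y 10) i = pvDigit (PySem.Int.floordiv z 10) i) ∨
              (pvDigit (PySem.Int.floordiv x 10) i ≠ pvDigit (PySem.Int.floordiv y 10) i ∧
                pvDigit (PySem.Int.floordiv y 10) i ≠ pvDigit (PySem.Int.floordiv z 10) i ∧
                pvDigit (PySem.Int.floordiv x 10) i ≠ pvDigit (PySem.Int.floordiv z 10) i) := by
      intro i hi
      simp only [pvDigit_floordiv]
      exact h (i + 1) (by omega)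
    have hsum : ((List.range (k + 1)).map
        (fun i => if pvDigit x i = pvDigit y i ∧ pvDigit y i = pvDigit z i then (2:Int) ^ i else 0)).sum
        = (if pvDigit x 0 = pvDigit y 0 ∧ pvDigit y 0 = pvDigit z 0 then (1:Int) else 0)
          + 2 * ((List.range k).map
            (fun i => if pvDigit (PySem.Int.floordiv x 10) i = pvDigit (PySem.Int.floordiv y 10) i ∧
                        pvDigit (PySem.Int.floordiv y 10) i = pvDigit (PySem.Int.floordiv z 10) i
                      then (2:Int) ^ i else 0)).sum := by
      rw [List.range_succ_eq_map, List.map_cons, List.map_map, List.sum_cons,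
          ← List.sum_map_mul_left]
      simp only [pvDigit_floordiv, pow_zero, Function.comp_def]
      congr 1
      refine congrArg (List.sum (α := Int)) (List.map_congr_left ?_)
      intro i _
      by_cases hc : pvDigit x (i + 1) = pvDigit y (i + 1) ∧ pvDigit y (i + 1) = pvDigit z (i + 1) <;>
        simp [hc, pow_succ]; ring
    rw [hsum]
    simp only [pvGoB, ih _ _ _ h', pvMod_eq_digit_zero]
    rcases h 0 (by omega) with he | hn
    · simp [he]
    · have hne : ¬ (pvDigit x 0 = pvDigit y 0 ∧ pvDigit y 0 = pvDigit z 0) := fun h' => hn.1 h'.1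
      simp [hn.1, hn.2.1, hn.2.2]

-- on a valid column, A's loop body just adds 2^i when the column is all equal
theorem pvStepA_valid (a b c res : Int) (i : Nat)
    (h : (pvDigit a i = pvDigit b i ∧ pvDigit b i = pvDigit c i) ∨
         (pvDigit a i ≠ pvDigit b i ∧ pvDigit b i ≠ pvDigit c i ∧ pvDigit a i ≠ pvDigit c i)) :
    pvStepA a b c (some res) i =
      some (res + if pvDigit a i = pvDigit b i ∧ pvDigit b i = pvDigit c i then 1 * 2 ^ i else 0) := by
  rcases h with he | hn
  · simp [pvStepA, he]
  · have hne : ¬ (pvDigit a i = pvDigit b i ∧ pvDigit b i = pvDigit c i) := fun h' => hn.1 h'.1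
    simp [pvStepA, hn.1, hn.2.1, hn.2.2]

-- ===== VERDICT (by name: the statement is the Claim_ definition above) =====
theorem get_set_binary_spec : Claim_equal_get_set_binary := by
  intro a b c _ hp
  unfold Spec_get_set_binary get_set_binary get_set_binary_alt
  rw [pvGoB_eval 5 a b c hp]
  rw [show List.range 5 = [0, 1, 2, 3, 4] from rfl]
  simp only [List.foldl_cons, List.foldl_nil,
    pvStepA_valid a b c _ 0 (hp 0 (by omega)),
    pvStepA_valid a b c _ 1 (hp 1 (by omega)),
    pvStepA_valid a b c _ 2 (hp 2 (by omega)),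
    pvStepA_valid a b c _ 3 (hp 3 (by omega)),
    pvStepA_valid a b c _ 4 (hp 4 (by omega)),
    Option.getD_some, List.map_cons, List.map_nil, List.sum_cons, List.sum_nil, one_mul]
  ring
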